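-- pv_equiv track=rewrite | github.com/saurabhmaurya6746/geeks_POTD | Difficulty: Easy/Split the Array/split-the-array.py | countgroup
-- ===== SOURCE A (Python) =====
-- def countgroup(arr):
--     MOD = 10**9 + 7
--     xr = 0
--     n = len(arr)
--
--     # Calculate the total XOR of the array
--     for num in arr:
--         xr ^= num
--
--     # If total XOR is not zero, no valid split exists
--     if xr != 0:
--         return 0
--
--     # Calculate 2^(n-1) % MOD
--     ans = 1
--     for i in range(n - 1):
--         ans = (ans * 2) % MOD
--
--     # Return result after subtracting 1 (to exclude the empty subset case)
--     return ans - 1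
-- ===== SOURCE B (Python) =====
-- def _modpow2(e, m):
--     # 2^e mod m by recursive exponentiation-by-squaring (e >= 0)
--     if e == 0:
--         return 1 % m
--     h = _modpow2(e // 2, m)
--     h = h * h % m
--     if e % 2:
--         h = h * 2 % m
--     return h
--
-- def countgroup(arr):
--     MOD = 10**9 + 7
--     xr = 0
--     for num in arr:
--         xr ^= num
--     if xr:
--         return 0
--     n = len(arr)
--     if n == 0:
--         return 0
--     return _modpow2(n - 1, MOD) - 1
-- ===== Notes on version B (the rewrite author's own statement) =====
-- stated objective: alternative
-- what changed: Replaces A's linear doubling loop for 2^(n-1) mod p with a recursive exponentiation-by-squaring helper (O(log n) multiplications), keeping the XOR pass.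
import Mathlib
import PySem

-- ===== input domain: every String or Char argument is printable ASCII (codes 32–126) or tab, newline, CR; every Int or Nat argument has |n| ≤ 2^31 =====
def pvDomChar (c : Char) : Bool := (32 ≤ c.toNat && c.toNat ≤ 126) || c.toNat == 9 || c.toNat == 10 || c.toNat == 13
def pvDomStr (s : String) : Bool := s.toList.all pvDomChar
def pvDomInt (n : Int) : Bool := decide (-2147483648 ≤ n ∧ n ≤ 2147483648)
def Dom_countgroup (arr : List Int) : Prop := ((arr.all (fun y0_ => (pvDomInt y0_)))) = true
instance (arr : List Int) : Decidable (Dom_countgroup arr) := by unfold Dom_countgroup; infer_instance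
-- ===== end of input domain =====

-- B replaces A's linear doubling loop for 2^(n-1) mod p with recursive exponentiation by squaring (objective: alternative).
-- ===== PORT A =====
def countgroup (arr : List Int) : Int :=
  let MOD : Int := 10 ^ 9 + 7
  let xr : Int := arr.foldl (fun xr num => PySem.Int.bxor xr num) 0
  let n : Int := arr.length
  if xr != 0 then 0
  else
    let ans : Int := (PySem.List.pyRange 0 (n - 1) 1).foldl
      (fun ans _i => PySem.Int.mod (ans * 2) MOD) 1
    ans - 1

-- ===== PORT B =====
-- recursion on e : Nat is exact for Source B's helper, which is only called with e ≥ 0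
def modpow2 (e : Nat) (m : Int) : Int :=
  if e = 0 then PySem.Int.mod 1 m
  else
    let h := modpow2 (e / 2) m
    let h := PySem.Int.mod (h * h) m
    if e % 2 ≠ 0 then PySem.Int.mod (h * 2) m else h

def countgroup_alt (arr : List Int) : Int :=
  let MOD : Int := 10 ^ 9 + 7
  let xr : Int := arr.foldl (fun xr num => PySem.Int.bxor xr num) 0
  if xr ≠ 0 then 0
  else
    let n := arr.length
    if n = 0 then 0
    else modpow2 (n - 1) MOD - 1

-- ===== PRECONDITION & SPEC =====
def Spec_countgroup (arr : List Int) (out : Int) : Prop := out = countgroup_alt arr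
instance (arr : List Int) (out : Int) : Decidable (Spec_countgroup arr out) := by unfold Spec_countgroup; infer_instance

-- ===== CLAIM (what is proved, stated in full; the proofs are below) =====
def Claim_equal_countgroup : Prop := ∀ (arr : List Int), Dom_countgroup arr → Spec_countgroup arr (countgroup arr)

-- ===== LEMMAS AND PROOFS =====

-- A's doubling loop computes a * 2^len mod p
theorem pow_loop (l : List Int) (a : Int) (ha : 0 ≤ a) (hlt : a < 10 ^ 9 + 7) :
    l.foldl (fun ans _i => PySem.Int.mod (ans * 2) (10 ^ 9 + 7)) a
      = a * 2 ^ l.length % (10 ^ 9 + 7) := by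
  induction l generalizing a with
  | nil =>
      have h' : a < 1000000007 := by norm_num at hlt; omega
      simp [Int.emod_eq_of_lt ha h']
  | cons x xs ih =>
      have hpos : (0:Int) < 10 ^ 9 + 7 := by norm_num
      simp only [List.foldl_cons, List.length_cons]
      rw [PySem.Int.mod_eq_emod_of_pos hpos,
        ih _ (Int.emod_nonneg _ (by norm_num)) (Int.emod_lt_of_pos _ hpos),
        Int.mul_emod, Int.emod_emod_of_dvd _ dvd_rfl, ← Int.mul_emod]
      ring_nf

-- B's squaring recursion computes 2^e mod p
theorem modpow2_eq (e : Nat) : modpow2 e (10 ^ 9 + 7) = 2 ^ e % (10 ^ 9 + 7) := by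
  have hpos : (0:Int) < 10 ^ 9 + 7 := by norm_num
  induction e using Nat.strong_induction_on with
  | _ e ih =>
    rw [modpow2]
    by_cases h0 : e = 0
    · simp [h0]
    · have hlt : e / 2 < e := Nat.div_lt_self (Nat.pos_of_ne_zero h0) (by norm_num)
      simp only [h0, if_false, ih _ hlt, PySem.Int.mod_eq_emod_of_pos hpos]
      have hpow : (2:Int) ^ e = 2 ^ (e / 2) * 2 ^ (e / 2) * 2 ^ (e % 2) := by
        rw [← pow_add, ← pow_add]
        congr 1
        omega
      by_cases h2 : e % 2 = 0
      · simp [h2, hpow]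
        rw [← Int.mul_emod]
      · have h1 : e % 2 = 1 := by omega
        simp only [h2, ne_eq, not_false_eq_true, if_pos]
        rw [hpow, h1, pow_one]
        conv_rhs => rw [Int.mul_emod]
        norm_num
        rw [← Int.mul_emod]

-- ===== VERDICT (by name: the statement is the Claim_ definition above) =====
theorem countgroup_spec : Claim_equal_countgroup := by
  intro arr _; unfold Spec_countgroup countgroup countgroup_alt
  simp only [PySem.List.pyRange_one, ne_eq, bne_iff_ne]
  by_cases h : arr.foldl (fun xr num => PySem.Int.bxor xr num) 0 = 0
  · simp only [h, not_true_eq_false, if_false]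
    by_cases hn : arr.length = 0
    · -- n = 0 : A's doubling loop is empty, ans = 1, both return 0
      have ha : arr = [] := List.eq_nil_of_length_eq_zero hn
      subst ha
      decide
    · simp only [hn, if_false]
      rw [pow_loop _ 1 (by norm_num) (by norm_num), modpow2_eq]
      simp only [List.length_map, List.length_range, one_mul]
      have he : ((arr.length : Int) - 1 - 0).toNat = arr.length - 1 := by omega
      rw [he]
  · simp [h]
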